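-- pv_equiv track=rewrite | github.com/Dianeha/algorithm_study | 190819/solvingclub.py | GNS
-- ===== SOURCE A (Python) =====
-- def GNS(str):
--     nums = ["ZRO", "ONE", "TWO", "THR", "FOR", "FIV", "SIX", "SVN", "EGT", "NIN"]
--     nums_dict = {
--         "ZRO": 0,
--         "ONE": 0,
--         "TWO": 0,
--         "THR": 0,
--         "FOR": 0,
--         "FIV": 0,
--         "SIX": 0,
--         "SVN": 0,
--         "EGT": 0,
--         "NIN": 0,
--     }
--
--     for x in str.split():
--         nums_dict[x] += 1
--
--     # result = []
--     # values = list(nums_dict.values())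
--     # for i in range(len(nums)):
--     #     for j in range(values[i]):
--     #         result.append(nums[i])
--     #
--     # return ' '.join(result)
--
--     result = ''
--     for num in nums:
--         result += (num+' ') * nums_dict[num]
--
--     return result[:-1]
-- ===== SOURCE B (Python) =====
-- def GNS(str):
--     nums = ["ZRO", "ONE", "TWO", "THR", "FOR", "FIV", "SIX", "SVN", "EGT", "NIN"]
--     order = {name: i for i, name in enumerate(nums)}
--     return ' '.join(sorted(str.split(), key=lambda w: order[w]))
-- ===== Notes on version B (the rewrite author's own statement) =====
-- stated objective: idiomatic
-- what changed: Instead of incrementing a pre-filled counter dict and reconstructing the output by repeating each symbol, B sorts the actual tokens by their numeric rank (an index dict built from the nums list) and joins them.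
import Mathlib
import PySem

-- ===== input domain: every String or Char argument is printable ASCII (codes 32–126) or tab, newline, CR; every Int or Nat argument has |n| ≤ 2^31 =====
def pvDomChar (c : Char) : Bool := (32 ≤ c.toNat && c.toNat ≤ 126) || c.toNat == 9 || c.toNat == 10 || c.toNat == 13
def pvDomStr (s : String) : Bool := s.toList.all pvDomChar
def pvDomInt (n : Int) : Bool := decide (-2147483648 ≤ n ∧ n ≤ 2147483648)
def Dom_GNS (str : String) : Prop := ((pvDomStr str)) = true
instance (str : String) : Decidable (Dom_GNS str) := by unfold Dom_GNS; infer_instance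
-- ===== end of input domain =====

-- B replaces A's pre-filled counter dict + per-symbol output reconstruction by sorting the
-- actual tokens by their numeric rank and joining them (idiomatic; not claimed faster).

-- the fixed list of number words, shared verbatim by both Pythons
def pvNums : List (List Char) :=
  ["ZRO".toList, "ONE".toList, "TWO".toList, "THR".toList, "FOR".toList,
   "FIV".toList, "SIX".toList, "SVN".toList, "EGT".toList, "NIN".toList]

-- ===== PORT A =====
-- 'nums_dict[x] += 1' : a missing key is Python's KeyError = the 'none' branch (excluded by Pre_)
def GNSstep (acc : Option (PySem.Dict (List Char) Int)) (x : List Char) :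
    Option (PySem.Dict (List Char) Int) :=
  match acc with
  | none => none
  | some d =>
    match d.get? x with
    | none => none
    | some v => some (d.insert x (v + 1))

-- the output loop: result += (num+' ') * nums_dict[num], then result[:-1]
-- (the lookup num is always a key: the dict holds all of nums)
def GNSfinish (d : PySem.Dict (List Char) Int) : String :=
  String.ofList (PySem.List.slice
    (pvNums.foldl (fun res num => res ++ PySem.List.pyRepeat (num ++ [' ']) (d.getD num 0)) [])
    none (some (-1)))

def GNS (str : String) : String :=
  match (PySem.Chars.split₀ str.toList).foldl GNSstep
      (some (PySem.Dict.ofList (pvNums.map (fun n => (n, 0))))) with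
  | none => ""   -- KeyError: unreachable under Pre_GNS
  | some d => GNSfinish d

-- ===== PORT B =====
-- order = {name: i for i, name in enumerate(nums)}
def GNSorder : PySem.Dict (List Char) Int :=
  PySem.Dict.ofList ((PySem.List.enumerate pvNums).map (fun p => (p.2, p.1)))

-- ' '.join(sorted(str.split(), key=lambda w: order[w]))
-- order[w] raises KeyError on an unknown token (excluded by Pre_GNS); the getD default is never read there
def GNS_alt (str : String) : String :=
  String.ofList (PySem.Chars.join [' ']
    (PySem.List.sorted (PySem.Chars.split₀ str.toList) (fun w => GNSorder.getD w 0) false))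

-- ===== PRECONDITION & SPEC =====
-- exactly the inputs A returns on: every whitespace-separated token is one of the ten number
-- words (on any other token A raises KeyError)
def Pre_GNS (str : String) : Prop :=
  ∀ w ∈ PySem.Chars.split₀ str.toList, w ∈ pvNums
instance (str : String) : Decidable (Pre_GNS str) := by unfold Pre_GNS; infer_instance

def pvWitness_GNS : String := "NIN ZRO NIN TWO"

def Spec_GNS (str : String) (out : String) : Prop := out = GNS_alt str
instance (str : String) (out : String) : Decidable (Spec_GNS str out) := by unfold Spec_GNS; infer_instance

-- ===== CLAIM (what is proved, stated in full; the proofs are below) =====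
def Claim_equal_GNS : Prop := ∀ (str : String), Dom_GNS str → Pre_GNS str → Spec_GNS str (GNS str)

-- ===== LEMMAS AND PROOFS =====

-- B's sort key, named for the proofs
def pvKey (w : List Char) : Int := GNSorder.getD w 0

-- the tokens grouped by rank: for each number word, its occurrences
def pvGrp (ts : List (List Char)) : List (List Char) :=
  pvNums.flatMap (fun n => List.replicate (ts.count n) n)

lemma slice_neg_one {α : Type} (xs : List α) :
    PySem.List.slice xs none (some (-1)) = xs.dropLast := by
  cases xs with
  | nil => rfl
  | cons x t =>
    simp only [PySem.List.slice, PySem.List.clampIdx]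
    rw [List.dropLast_eq_take]
    norm_num
    split_ifs with h
    · exact absurd h (by omega)
    · omega

lemma join_dropLast (L : List (List Char)) :
    PySem.Chars.join [' '] L = (L.flatMap (· ++ [' '])).dropLast := by
  induction L with
  | nil => rfl
  | cons a L ih =>
    cases L with
    | nil => simp [PySem.Chars.join_singleton]
    | cons b t =>
      rw [PySem.Chars.join_cons_cons, ih]
      rw [show (a :: b :: t).flatMap (· ++ [' ']) =
            (a ++ [' ']) ++ (b :: t).flatMap (· ++ [' ']) from by simp]
      rw [List.dropLast_append_of_ne_nil (by simp)]

lemma insertBy_skip {α : Type} (before : α → α → Bool) (x : α) (as bs : List α)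
    (h : ∀ a ∈ as, before x a = false) :
    PySem.List.insertBy before x (as ++ bs) = as ++ PySem.List.insertBy before x bs := by
  induction as with
  | nil => rfl
  | cons a t ih =>
    simp only [List.cons_append, PySem.List.insertBy, h a (by simp)]
    simp only [Bool.false_eq_true, if_false, List.cons.injEq, true_and]
    exact ih (fun a ha => h a (by simp [ha]))

lemma insertBy_here {α : Type} (before : α → α → Bool) (x : α) (bs : List α)
    (h : ∀ b ∈ bs, before x b = true) :
    PySem.List.insertBy before x bs = x :: bs := by
  cases bs with
  | nil => rfl
  | cons b t => simp [PySem.List.insertBy, h b (by simp)]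

-- inserting one more x into a rank-grouped list appends it to its own group
lemma insert_grouped {α : Type} [DecidableEq α] (key : α → Int) (c : α → Nat) (x : α) :
    ∀ ns : List α, ns.Pairwise (fun a b => key a < key b) → x ∈ ns →
    PySem.List.insertBy (fun a b => decide (key a < key b)) x
        (ns.flatMap (fun n => List.replicate (c n) n))
      = ns.flatMap (fun n => List.replicate (c n) n ++ if n = x then [x] else []) := by
  intro ns
  induction ns with
  | nil => intro _ h; cases h
  | cons n t ih =>
    intro hp hx
    have hlt : ∀ b ∈ t, key n < key b := fun b hb => List.rel_of_pairwise_cons hp hb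
    rw [List.flatMap_cons, List.flatMap_cons]
    rcases List.mem_cons.mp hx with rfl | hxt
    · -- x is the head group: skip its copies, insert before everything after
      rw [insertBy_skip _ _ _ _ (by
        intro a ha; rcases List.eq_of_mem_replicate ha with rfl; simp)]
      rw [insertBy_here _ _ _ (by
        intro b hb
        rcases List.mem_flatMap.mp hb with ⟨m, hm, hbm⟩
        rcases List.eq_of_mem_replicate hbm with rfl
        simpa using hlt _ hm)]
      have hnx : ∀ m ∈ t, ¬ (m = x) := by
        intro m hm rfl; exact absurd (hlt _ hm) (lt_irrefl _)
      rw [if_pos rfl]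
      have ht : List.flatMap (fun n => List.replicate (c n) n ++ if n = x then [x] else []) t
           = List.flatMap (fun n => List.replicate (c n) n) t := by
        apply List.flatMap_congr; intro m hm; rw [if_neg (hnx m hm)]; simp
      rw [ht]
      simp
    · -- x lies in a later group: its key is larger, skip the head group and recurse
      have hnx : n ≠ x := fun h => absurd (hlt _ (h ▸ hxt)) (lt_irrefl _)
      rw [insertBy_skip _ _ _ _ (by
        intro a ha; rcases List.eq_of_mem_replicate ha with rfl
        simpa using le_of_lt (hlt _ hxt))]
      rw [ih (List.pairwise_cons.mp hp).2 hxt, if_neg hnx]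
      simp

-- B's stable sort by rank groups the tokens exactly as pvGrp does
lemma sorted_grouped : ∀ ts : List (List Char), (∀ t ∈ ts, t ∈ pvNums) →
    PySem.List.sorted ts pvKey false = pvGrp ts := by
  intro ts
  rw [PySem.List.sorted_eq_foldl_insertBy]
  induction ts using List.reverseRecOn with
  | nil => intro _; decide
  | append_singleton ts x ih =>
    intro h
    rw [List.foldl_append, List.foldl_cons, List.foldl_nil]
    rw [ih (fun t ht => h t (by simp [ht]))]
    rw [pvGrp, insert_grouped pvKey _ x pvNums (by decide) (h x (by simp))]
    rw [pvGrp]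
    apply List.flatMap_congr
    intro n _
    rw [List.count_append]
    by_cases hnx : n = x
    · subst hnx
      simp [List.replicate_add]
    · rw [if_neg hnx]
      simp [Ne.symm hnx]

-- A's increment loop succeeds on known tokens and its dict ends up holding the counts
lemma loopA : ∀ (ts : List (List Char)) (d : PySem.Dict (List Char) Int),
    (∀ t ∈ ts, d.contains t = true) →
    ∃ d', ts.foldl GNSstep (some d) = some d' ∧
      (∀ w, d'.contains w = d.contains w) ∧
      (∀ w, d'.getD w 0 = d.getD w 0 + ts.count w) := by
  intro ts
  induction ts with
  | nil => intro d _; exact ⟨d, rfl, fun _ => rfl, by simp⟩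
  | cons t ts ih =>
    intro d h
    have hc : d.contains t = true := h t (by simp)
    rw [PySem.Dict.contains_eq_isSome_get?] at hc
    obtain ⟨v, hv⟩ := Option.isSome_iff_exists.mp hc
    have hstep : GNSstep (some d) t = some (d.insert t (v + 1)) := by
      simp [GNSstep, hv]
    have hcont : ∀ w, (d.insert t (v + 1)).contains w = d.contains w := by
      intro w
      rw [PySem.Dict.contains_insert]
      by_cases hw : w = t
      · subst hw
        simp [PySem.Dict.contains_eq_isSome_get?, hv]
      · simp [hw]
    obtain ⟨d', hfold, hcont', hgetD⟩ :=
      ih (d.insert t (v + 1)) (fun t' ht' => (hcont t').trans (h t' (by simp [ht'])))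
    refine ⟨d', by rw [List.foldl_cons, hstep]; exact hfold,
      fun w => (hcont' w).trans (hcont w), ?_⟩
    intro w
    rw [hgetD w, PySem.Dict.getD_insert]
    have hvd : d.getD t 0 = v := PySem.Dict.getD_of_get?_eq_some d 0 hv
    by_cases hw : w = t
    · subst hw
      rw [if_pos rfl, hvd, List.count_cons_self]
      push_cast
      ring
    · rw [if_neg hw]; simp [Ne.symm hw]

-- ===== VERDICT (by name: the statement is the Claim_ definition above) =====
theorem GNS_spec : Claim_equal_GNS := by
  intro str _ hpre
  unfold Spec_GNS GNS GNS_alt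
  set ts := PySem.Chars.split₀ str.toList with hts
  obtain ⟨d', hfold, _, hgetD⟩ :=
    loopA ts (PySem.Dict.ofList (pvNums.map (fun n => (n, 0))))
      (fun t ht => by
        have h := hpre t ht
        fin_cases h <;> decide)
  rw [hfold]
  change GNSfinish d' = _
  unfold GNSfinish
  have hcount : ∀ n ∈ pvNums, d'.getD n 0 = (ts.count n : Int) := by
    intro n hn
    rw [hgetD n]
    have h0 : (PySem.Dict.ofList (pvNums.map (fun n => (n, (0 : Int))))).getD n 0 = (0 : Int) := by
      fin_cases hn <;> decide
    omega
  rw [PySem.List.foldl_append_eq_flatMap, List.nil_append]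
  have hflat : pvNums.flatMap (fun num => PySem.List.pyRepeat (num ++ [' ']) (d'.getD num 0))
      = (pvGrp ts).flatMap (· ++ [' ']) := by
    rw [pvGrp, List.flatMap_assoc]
    apply List.flatMap_congr
    intro n hn
    rw [hcount n hn]
    simp [PySem.List.pyRepeat, List.flatMap_replicate]
  rw [hflat, slice_neg_one, ← join_dropLast]
  rw [show (fun w => GNSorder.getD w 0) = pvKey from rfl]
  rw [sorted_grouped ts hpre]
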